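-- pv_equiv track=rewrite | github.com/vuphuc174/CrawlWP | quotes/quotes/spiders/quotes_spider.py | findSameNameTaxonomy
-- ===== SOURCE A (Python) =====
-- def findSameNameTaxonomy(name, taxonomyLit):
--     """Search same taxonomy (category/tag) name from taxonomy (category/tag) list
--     Args:
--         name (str): category/tag name to find
--         taxonomyLit (list): category/tag list
--     Returns:
--         found taxonomy info (dict)
--     Raises:
--     """
--     foundTaxonomy = None
--
--     sameNameTaxonomy = None
--     lowercaseSameNameTaxonomy = None
--     lowerName = name.lower() # 'mac'
--
--     for eachTaxonomy in taxonomyLit: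
--         curTaxonomyName = eachTaxonomy["name"] # 'Cocoa', 'Mac'
--         curTaxonomyLowerName = curTaxonomyName.lower() # 'cocoa', 'mac'
--         if curTaxonomyName == name:
--             sameNameTaxonomy = eachTaxonomy
--             break
--         elif curTaxonomyLowerName == lowerName:
--             lowercaseSameNameTaxonomy = eachTaxonomy
--
--     if sameNameTaxonomy:
--         foundTaxonomy = sameNameTaxonomy
--     elif lowercaseSameNameTaxonomy:
--         foundTaxonomy = lowercaseSameNameTaxonomy
--
--     return foundTaxonomy
-- ===== SOURCE B (Python) =====
-- def findSameNameTaxonomy(name, taxonomyLit):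
--     """Two declarative scans: first exact match wins; otherwise the last
--     case-insensitive match (found by scanning in reverse) is the fallback."""
--     exact = next((t for t in taxonomyLit if t["name"] == name), None)
--     if exact is not None:
--         return exact
--     lowerName = name.lower()
--     return next((t for t in reversed(taxonomyLit) if t["name"].lower() == lowerName), None)
-- ===== Notes on version B (the rewrite author's own statement) =====
-- stated objective: idiomatic
-- what changed: Replaced the single accumulator loop with break and two accumulator variables by two declarative next() searches: the first exact match, else the last case-insensitive match obtained by scanning the list in reverse.
import Mathlib
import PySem

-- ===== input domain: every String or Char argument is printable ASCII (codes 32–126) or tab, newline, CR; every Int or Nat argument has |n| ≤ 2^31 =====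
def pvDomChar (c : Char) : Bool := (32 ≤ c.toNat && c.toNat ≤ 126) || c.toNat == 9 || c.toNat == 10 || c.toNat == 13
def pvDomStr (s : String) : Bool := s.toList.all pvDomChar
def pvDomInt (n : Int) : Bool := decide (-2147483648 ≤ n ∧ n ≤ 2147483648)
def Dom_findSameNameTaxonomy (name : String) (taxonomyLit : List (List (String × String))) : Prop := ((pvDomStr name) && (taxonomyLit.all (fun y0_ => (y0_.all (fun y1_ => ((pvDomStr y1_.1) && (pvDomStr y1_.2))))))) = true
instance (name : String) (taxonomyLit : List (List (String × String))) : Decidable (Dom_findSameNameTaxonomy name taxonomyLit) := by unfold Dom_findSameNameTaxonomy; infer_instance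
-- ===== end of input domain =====

-- B replaces A's one accumulator loop (with break) by two declarative scans:
-- first exact match, else last case-insensitive match via a reverse scan (idiomatic).

-- ===== PORT A =====
-- dict lookup on an association list (first match = Python dict lookup)
def pvGet? (d : List (String × String)) (k : String) : Option String :=
  (d.find? (fun kv => kv.1 == k)).map (fun kv => kv.2)
def pvGetD (d : List (String × String)) (k : String) (dflt : String) : String :=
  (pvGet? d k).getD dflt

-- A's for-loop with break, carried state = (sameNameTaxonomy, lowercaseSameNameTaxonomy).
-- eachTaxonomy["name"] raises KeyError when the key is absent; such inputs are excluded by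
-- Pre_, so it is ported as a first-match assoc-list lookup (pvGetD) with dummy default "" — exact on Pre_.
def pvLoopA (name lowerName : String) :
    List (List (String × String)) → Option (List (String × String)) →
    Option (List (String × String)) × Option (List (String × String))
  | [], lc => (none, lc)
  | t :: rest, lc =>
    let curTaxonomyName := pvGetD t "name" ""
    let curTaxonomyLowerName := PySem.Str.lower curTaxonomyName
    if curTaxonomyName == name then (some t, lc)            -- break
    else if curTaxonomyLowerName == lowerName then pvLoopA name lowerName rest (some t)
    else pvLoopA name lowerName rest lc

-- Python's truthiness tests 'if sameNameTaxonomy:' are ported as Option matches; under Pre_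
-- every matched dict contains the key "name", hence is non-empty (truthy) — exact on Pre_.
def findSameNameTaxonomy (name : String) (taxonomyLit : List (List (String × String))) : Option (List (String × String)) :=
  let lowerName := PySem.Str.lower name
  match pvLoopA name lowerName taxonomyLit none with
  | (some sameNameTaxonomy, _) => some sameNameTaxonomy
  | (none, some lowercaseSameNameTaxonomy) => some lowercaseSameNameTaxonomy
  | (none, none) => none

-- ===== PORT B =====
-- next(...) over a generator = List.find?; reversed(...) = List.reverse.
-- t["name"] ported as a first-match assoc-list lookup (pvGetD) with dummy default "" as in port A — exact on Pre_.
def findSameNameTaxonomy_alt (name : String) (taxonomyLit : List (List (String × String))) : Option (List (String × String)) :=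
  match taxonomyLit.find? (fun t => pvGetD t "name" "" == name) with
  | some exact => some exact
  | none =>
    let lowerName := PySem.Str.lower name
    taxonomyLit.reverse.find? (fun t => PySem.Str.lower (pvGetD t "name" "") == lowerName)

-- ===== PRECONDITION & SPEC =====
-- Pre_ excludes exactly the inputs where A raises KeyError: a dict without key "name" is
-- reached by the loop, i.e. no exact match occurs among the dicts before the first keyless one.
def Pre_findSameNameTaxonomy (name : String) (taxonomyLit : List (List (String × String))) : Prop :=
  (∀ t ∈ taxonomyLit, (pvGet? t "name").isSome) ∨
  (∃ t ∈ taxonomyLit.takeWhile (fun t => (pvGet? t "name").isSome),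
      pvGet? t "name" = some name)
instance (name : String) (taxonomyLit : List (List (String × String))) : Decidable (Pre_findSameNameTaxonomy name taxonomyLit) := by unfold Pre_findSameNameTaxonomy; infer_instance

def pvWitness_findSameNameTaxonomy : String × (List (List (String × String))) :=
  ("Mac", [[("name", "Cocoa")], [("name", "mac")], [("name", "MAC")]])

def Spec_findSameNameTaxonomy (name : String) (taxonomyLit : List (List (String × String))) (out : Option (List (String × String))) : Prop := out = findSameNameTaxonomy_alt name taxonomyLit
instance (name : String) (taxonomyLit : List (List (String × String))) (out : Option (List (String × String))) : Decidable (Spec_findSameNameTaxonomy name taxonomyLit out) := by unfold Spec_findSameNameTaxonomy; infer_instance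

-- ===== CLAIM (what is proved, stated in full; the proofs are below) =====
def Claim_equal_findSameNameTaxonomy : Prop := ∀ (name : String) (taxonomyLit : List (List (String × String))), Dom_findSameNameTaxonomy name taxonomyLit → Pre_findSameNameTaxonomy name taxonomyLit → Spec_findSameNameTaxonomy name taxonomyLit (findSameNameTaxonomy name taxonomyLit)

-- ===== LEMMAS AND PROOFS =====

-- Collapse the loop's result pair to the function's final answer.
def pvResultOf : Option (List (String × String)) × Option (List (String × String)) → Option (List (String × String))
  | (some t, _) => some t
  | (none, lc) => lc

-- Key invariant: the loop computes "first exact match, else last case-insensitive match,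
-- else the incoming accumulator".
theorem pvLoopA_char (name lowerName : String) (l : List (List (String × String)))
    (lc : Option (List (String × String))) :
    pvResultOf (pvLoopA name lowerName l lc) =
      match l.find? (fun t => pvGetD t "name" "" == name) with
      | some t => some t
      | none =>
        match l.reverse.find? (fun t => PySem.Str.lower (pvGetD t "name" "") == lowerName) with
        | some t => some t
        | none => lc := by
  induction l generalizing lc with
  | nil => simp [pvLoopA, pvResultOf]
  | cons t rest ih =>
    by_cases hE : (pvGetD t "name" "" == name) = true
    · simp [pvLoopA, hE, pvResultOf, List.find?]
    · by_cases hL : (PySem.Str.lower (pvGetD t "name" "") == lowerName) = true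
      · simp only [pvLoopA, hE, hL, if_false, if_true, Bool.false_eq_true, List.find?,
          List.reverse_cons, List.find?_append]
        rw [ih]
        cases rest.find? (fun t => pvGetD t "name" "" == name) with
        | some u => simp
        | none =>
          cases rest.reverse.find? (fun t => PySem.Str.lower (pvGetD t "name" "") == lowerName) with
          | some u => simp
          | none => simp
      · simp only [pvLoopA, hE, hL, if_false, Bool.false_eq_true, List.find?,
          List.reverse_cons, List.find?_append]
        rw [ih]
        cases rest.find? (fun t => pvGetD t "name" "" == name) with
        | some u => simp
        | none =>
          cases rest.reverse.find? (fun t => PySem.Str.lower (pvGetD t "name" "") == lowerName) with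
          | some u => simp
          | none => simp

-- ===== VERDICT (by name: the statement is the Claim_ definition above) =====
theorem findSameNameTaxonomy_spec : Claim_equal_findSameNameTaxonomy := by
  intro name taxonomyLit _ _
  unfold Spec_findSameNameTaxonomy findSameNameTaxonomy findSameNameTaxonomy_alt
  have h := pvLoopA_char name (PySem.Str.lower name) taxonomyLit none
  cases hp : pvLoopA name (PySem.Str.lower name) taxonomyLit none with
  | mk s lc =>
    rw [hp] at h
    simp only [hp]
    cases hF : taxonomyLit.find? (fun t => pvGetD t "name" "" == name) with
    | some u =>
      simp only [hF] at h
      cases s <;> cases lc <;> simp only [pvResultOf] at h <;> simp [h]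
    | none =>
      simp only [hF] at h
      cases hR : taxonomyLit.reverse.find?
          (fun t => PySem.Str.lower (pvGetD t "name" "") == PySem.Str.lower name) with
      | some u =>
        simp only [hR] at h
        cases s <;> cases lc <;> simp only [pvResultOf] at h <;> simp [h]
      | none =>
        simp only [hR] at h
        cases s <;> cases lc <;> simp only [pvResultOf] at h <;> simp [h]
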